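-- pv_equiv track=rewrite | github.com/kitovish01/lead-scoring-service | utils.py | compute_role_score
-- ===== SOURCE A (Python) =====
-- def compute_role_score(role):
--     if not role: return 0
--     r = role.lower()
--     decision = ['ceo','founder','co-founder','cofounder','head of','vp','vice president','director','chief','cto','cmo','president','owner','managing director']
--     influencer = ['manager','lead','principal','senior','staff','growth','product','bd','business development','account executive','sales']
--     for d in decision:
--         if d in r:
--             return 20
--     for inf in influencer:
--         if inf in r:
--             return 10
--     return 0
-- ===== SOURCE B (Python) =====
-- def compute_role_score(role):
--     if not role: return 0
--     r = role.lower()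
--     decision = ['ceo','founder','co-founder','cofounder','head of','vp','vice president','director','chief','cto','cmo','president','owner','managing director']
--     influencer = ['manager','lead','principal','senior','staff','growth','product','bd','business development','account executive','sales']
--     # position-major scan: one left-to-right pass over the string per tier,
--     # testing all keywords at each position (instead of keyword-major 'in' scans)
--     for i in range(len(r)):
--         if any(r.startswith(d, i) for d in decision):
--             return 20
--     for i in range(len(r)):
--         if any(r.startswith(f, i) for f in influencer):
--             return 10
--     return 0
-- ===== Notes on version B (the rewrite author's own statement) =====
-- stated objective: alternative
-- what changed: Replaces the keyword-major loops that test each keyword for containment in the whole string by a position-major scan: one left-to-right pass over the string per tier, checking at each position whether any keyword of that tier starts there.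
import Mathlib
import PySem

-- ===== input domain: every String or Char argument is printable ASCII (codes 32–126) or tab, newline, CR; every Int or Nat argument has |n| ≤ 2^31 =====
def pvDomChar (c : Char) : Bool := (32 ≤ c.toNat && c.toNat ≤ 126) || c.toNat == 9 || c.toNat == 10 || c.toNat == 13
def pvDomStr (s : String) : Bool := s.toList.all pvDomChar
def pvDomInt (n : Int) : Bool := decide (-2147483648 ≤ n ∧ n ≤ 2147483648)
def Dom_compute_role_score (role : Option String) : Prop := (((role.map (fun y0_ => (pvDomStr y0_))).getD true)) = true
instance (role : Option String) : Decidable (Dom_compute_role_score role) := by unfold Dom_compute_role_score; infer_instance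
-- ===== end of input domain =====

-- B replaces A's keyword-major 'in' loops by a position-major single scan per tier; objective: alternative (same cost class).

-- ===== PORT A =====
def pvDecision : List String := ["ceo","founder","co-founder","cofounder","head of","vp","vice president","director","chief","cto","cmo","president","owner","managing director"]
def pvInfluencer : List String := ["manager","lead","principal","senior","staff","growth","product","bd","business development","account executive","sales"]

-- A's 'for d in kws: if d in r: return ...' loop
def pvScanKwA (kws : List String) (r : String) : Bool :=
  match kws with
  | [] => false
  | d :: rest => if PySem.Str.isIn d r then true else pvScanKwA rest r

def compute_role_score (role : Option String) : Int :=
  match role with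
  | none => 0
  | some s =>
    if s = "" then 0
    else
      let r := PySem.Str.lower s
      if pvScanKwA pvDecision r then 20
      else if pvScanKwA pvInfluencer r then 10
      else 0

-- ===== PORT B =====
def pvDecisionL : List (List Char) := pvDecision.map String.toList
def pvInfluencerL : List (List Char) := pvInfluencer.map String.toList

-- 'any(r.startswith(k, i) for k in kws)' at the position whose suffix is suf
def pvAnyAt (kws : List (List Char)) (suf : List Char) : Bool :=
  kws.any (fun k => PySem.Chars.startswith suf k)

-- B's 'for i in range(len(r)): if any(...): return ...' loop, i ↦ the suffix r[i:]
def pvScanPosB (kws : List (List Char)) : List Char → Bool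
  | [] => false
  | c :: t => if pvAnyAt kws (c :: t) then true else pvScanPosB kws t

def compute_role_score_alt (role : Option String) : Int :=
  match role with
  | none => 0
  | some s =>
    if s = "" then 0
    else
      let r := (PySem.Str.lower s).toList
      if pvScanPosB pvDecisionL r then 20
      else if pvScanPosB pvInfluencerL r then 10
      else 0

-- ===== PRECONDITION & SPEC =====
def Spec_compute_role_score (role : Option String) (out : Int) : Prop := out = compute_role_score_alt role
instance (role : Option String) (out : Int) : Decidable (Spec_compute_role_score role out) := by unfold Spec_compute_role_score; infer_instance

-- ===== CLAIM (what is proved, stated in full; the proofs are below) =====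
def Claim_equal_compute_role_score : Prop := ∀ (role : Option String), Dom_compute_role_score role → Spec_compute_role_score role (compute_role_score role)

-- ===== LEMMAS AND PROOFS =====

theorem pvScanKwA_iff (kws : List String) (r : String) :
    pvScanKwA kws r = true ↔ ∃ d ∈ kws, d.toList <:+: r.toList := by
  induction kws with
  | nil => simp [pvScanKwA]
  | cons d rest ih =>
    simp only [pvScanKwA]
    split_ifs with h
    · simp only [true_iff]
      exact ⟨d, List.mem_cons_self .., (PySem.Str.isIn_iff_infix ..).1 h⟩
    · rw [ih]
      constructor
      · rintro ⟨k, hk, hinf⟩; exact ⟨k, List.mem_cons_of_mem _ hk, hinf⟩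
      · rintro ⟨k, hk, hinf⟩
        rcases List.mem_cons.1 hk with rfl | hk'
        · exact absurd ((PySem.Str.isIn_iff_infix ..).2 hinf) h
        · exact ⟨k, hk', hinf⟩

theorem pvScanPosB_iff (kws : List (List Char)) (l : List Char)
    (hne : ∀ k ∈ kws, k ≠ []) :
    pvScanPosB kws l = true ↔ ∃ k ∈ kws, ∃ j, k <+: l.drop j := by
  induction l with
  | nil =>
    simp only [pvScanPosB]
    constructor
    · intro h; exact absurd h (by simp)
    · rintro ⟨k, hk, j, hp⟩
      exact absurd (hne k hk (List.prefix_nil.1 (by simpa using hp))) (by simp)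
  | cons c t ih =>
    simp only [pvScanPosB]
    split_ifs with h
    · simp only [true_iff]
      rcases List.any_eq_true.1 h with ⟨k, hk, hs⟩
      exact ⟨k, hk, 0, by simpa using (PySem.Chars.startswith_iff ..).1 hs⟩
    · rw [ih]
      constructor
      · rintro ⟨k, hk, j, hp⟩; exact ⟨k, hk, j + 1, by simpa using hp⟩
      · rintro ⟨k, hk, j, hp⟩
        cases j with
        | zero =>
          exact absurd (List.any_eq_true.2 ⟨k, hk, (PySem.Chars.startswith_iff ..).2 (by simpa using hp)⟩) h
        | succ j' => exact ⟨k, hk, j', by simpa using hp⟩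

theorem infix_iff_exists_drop (k l : List Char) : k <:+: l ↔ ∃ j, k <+: l.drop j := by
  rw [← PySem.Chars.isIn_iff_infix, ← PySem.Chars.exists_prefix_drop_iff_isIn]

theorem scan_eq (kws : List String) (r : String)
    (hne : ∀ k ∈ kws.map String.toList, k ≠ []) :
    pvScanKwA kws r = pvScanPosB (kws.map String.toList) r.toList := by
  rw [Bool.eq_iff_iff, pvScanKwA_iff, pvScanPosB_iff _ _ hne]
  constructor
  · rintro ⟨d, hd, hinf⟩
    exact ⟨d.toList, List.mem_map_of_mem hd, (infix_iff_exists_drop ..).1 hinf⟩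
  · rintro ⟨k, hk, hj⟩
    rcases List.mem_map.1 hk with ⟨d, hd, rfl⟩
    exact ⟨d, hd, (infix_iff_exists_drop ..).2 hj⟩

theorem decision_ne : ∀ k ∈ pvDecision.map String.toList, k ≠ [] := by decide
theorem influencer_ne : ∀ k ∈ pvInfluencer.map String.toList, k ≠ [] := by decide

-- ===== VERDICT (by name: the statement is the Claim_ definition above) =====
theorem compute_role_score_spec : Claim_equal_compute_role_score := by
  intro role _
  unfold Spec_compute_role_score compute_role_score compute_role_score_alt
  cases role with
  | none => rfl
  | some s =>
    simp only [pvDecisionL, pvInfluencerL,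
      ← scan_eq pvDecision (PySem.Str.lower s) decision_ne,
      ← scan_eq pvInfluencer (PySem.Str.lower s) influencer_ne]
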